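-- pv_equiv track=rewrite | github.com/TaeTaeKim/Coding_Test | 프로그래머스/더맵게.py | solution
-- ===== SOURCE A (Python) =====
-- import heapq as hq
--
-- def solution(scoville, K):
--     hq.heapify(scoville)
--     cnt = 0
--     while scoville[0]<K:
--         if len(scoville)<=1:
--             return -1
--         new = hq.heappop(scoville) + hq.heappop(scoville)*2
--         hq.heappush(scoville,new)
--         cnt +=1
--     return cnt
-- ===== SOURCE B (Python) =====
-- import bisect
--
-- def solution(scoville, K):
--     # NOTE: like A, mutates its argument in place (A heapifies it; B sorts it).
--     scoville.sort()
--     cnt = 0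
--     while scoville[0] < K:
--         if len(scoville) <= 1:
--             return -1
--         a = scoville.pop(0)
--         b = scoville.pop(0)
--         bisect.insort(scoville, a + 2 * b)
--         cnt += 1
--     return cnt
-- ===== Notes on version B (the rewrite author's own statement) =====
-- stated objective: alternative
-- what changed: Replaces the lazy binary heap (heapify/heappop/heappush) with a fully maintained sorted list: sort once, pop the two head elements and reinsert the mix with bisect.insort.
import Mathlib
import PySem

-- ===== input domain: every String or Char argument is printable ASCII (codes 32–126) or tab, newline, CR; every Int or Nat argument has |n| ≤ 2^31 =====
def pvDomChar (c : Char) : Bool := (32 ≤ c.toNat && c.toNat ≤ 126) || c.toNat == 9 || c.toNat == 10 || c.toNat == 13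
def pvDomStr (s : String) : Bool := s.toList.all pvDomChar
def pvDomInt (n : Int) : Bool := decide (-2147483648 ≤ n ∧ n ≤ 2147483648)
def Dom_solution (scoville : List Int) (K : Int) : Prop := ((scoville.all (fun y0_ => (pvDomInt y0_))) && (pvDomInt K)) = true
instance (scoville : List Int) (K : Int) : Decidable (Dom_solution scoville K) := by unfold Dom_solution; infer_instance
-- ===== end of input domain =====

-- B replaces A's lazy binary heap (hand-ported CPython heapq) by a fully maintained sorted
-- list (sort once, pop the two heads, reinsert with an ordered insert); objective: alternative.
-- Like A (which heapifies its argument in place), B sorts its argument in place; the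
-- equivalence proved here is about the RETURN value only.

-- ===== PORT A =====
-- hand port of CPython's heapq _siftdown/_siftup/heapify/heappop/heappush (no PySem
-- primitive for heapq); exact: every index these touch is in range, so List.getD/List.set
-- agree with Python's indexing/assignment; the Nat fuel parameters only make each loop's
-- recursion structural (each is provably sufficient, the 0-cases are never reached), and
-- the empty-pop IndexError is excluded by Pre_solution.
-- CPython's _siftdown (bubble the value newitem up from pos toward startpos).
-- The Nat fuel only makes the recursion structural: pos strictly decreases, so
-- fuel = pos is always enough and the 0-case is the loop's own exit.
def pvSiftdownGo : Nat → List Int → Nat → Nat → Int → List Int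
  | 0, heap, _, pos, newitem => heap.set pos newitem
  | fuel+1, heap, startpos, pos, newitem =>
    if startpos < pos then
      let parent := heap.getD ((pos-1)/2) 0
      if newitem < parent then
        pvSiftdownGo fuel (heap.set pos parent) startpos ((pos-1)/2) newitem
      else heap.set pos newitem
    else heap.set pos newitem

def pvSiftdown (heap : List Int) (startpos pos : Nat) (newitem : Int) : List Int :=
  pvSiftdownGo pos heap startpos pos newitem

-- CPython's _siftup descent loop (move the smaller child up until a leaf); pos
-- strictly increases below heap.length, so fuel = heap.length is always enough.
def pvSiftupLoopGo : Nat → List Int → Nat → List Int × Nat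
  | 0, heap, pos => (heap, pos)
  | fuel+1, heap, pos =>
    if 2*pos+1 < heap.length then
      let childpos := 2*pos+1
      let childpos2 := if childpos+1 < heap.length ∧ ¬ (heap.getD childpos 0 < heap.getD (childpos+1) 0) then childpos+1 else childpos
      pvSiftupLoopGo fuel (heap.set pos (heap.getD childpos2 0)) childpos2
    else (heap, pos)

def pvSiftupLoop (heap : List Int) (pos : Nat) : List Int × Nat :=
  pvSiftupLoopGo heap.length heap pos

def pvSiftup (heap : List Int) (pos : Nat) : List Int :=
  let newitem := heap.getD pos 0
  let hp := pvSiftupLoop heap pos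
  pvSiftdown hp.1 pos hp.2 newitem

def pvHeapify (l : List Int) : List Int :=
  (List.range (l.length / 2)).reverse.foldl (fun h i => pvSiftup h i) l

def pvHeappop (heap : List Int) : Int × List Int :=
  match heap.getLast? with
  | none => (0, [])          -- Python: IndexError (never reached under Pre_solution)
  | some lastelt =>
      let rest := heap.dropLast
      if rest.isEmpty then (lastelt, rest)
      else (rest.getD 0 0, pvSiftup (rest.set 0 lastelt) 0)

def pvHeappush (heap : List Int) (item : Int) : List Int :=
  pvSiftdown (heap ++ [item]) 0 heap.length item

-- the while loop of A; it removes one element per iteration, so fuel = length + 1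
-- is always enough and the 0-case is unreachable
def pvLoopAGo : Nat → List Int → Int → Int → Int
  | 0, _, _, cnt => cnt
  | fuel+1, heap, K, cnt =>
    if heap.getD 0 0 < K then
      if heap.length ≤ 1 then -1
      else
        let p1 := pvHeappop heap
        let p2 := pvHeappop p1.2
        pvLoopAGo fuel (pvHeappush p2.2 (p1.1 + p2.1 * 2)) K (cnt + 1)
    else cnt

def solution (scoville : List Int) (K : Int) : Int :=
  pvLoopAGo (scoville.length + 1) (pvHeapify scoville) K 0

-- ===== PORT B =====
-- ordered insert = bisect.insort (insert after equal elements)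
def pvInsort : List Int → Int → List Int
  | [], x => [x]
  | y :: ys, x => if x < y then x :: y :: ys else y :: pvInsort ys x

-- the while loop of B; same fuel argument as pvLoopAGo
def pvLoopBGo : Nat → List Int → Int → Int → Int
  | 0, _, _, cnt => cnt
  | fuel+1, s, K, cnt =>
    if s.getD 0 0 < K then
      if s.length ≤ 1 then -1
      else pvLoopBGo fuel (pvInsort (s.drop 2) (s.getD 0 0 + 2 * s.getD 1 0)) K (cnt + 1)
    else cnt

def solution_alt (scoville : List Int) (K : Int) : Int :=
  pvLoopBGo (scoville.length + 1) (PySem.List.sorted scoville (fun x => x) false) K 0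

-- ===== PRECONDITION & SPEC =====
-- Pre_solution excludes only the empty list, on which A raises IndexError (scoville[0]).
def Pre_solution (scoville : List Int) (K : Int) : Prop := scoville ≠ []
instance (scoville : List Int) (K : Int) : Decidable (Pre_solution scoville K) := by
  unfold Pre_solution; infer_instance

def pvWitness_solution : List Int × Int := ([1, 2, 9], 7)

def Spec_solution (scoville : List Int) (K : Int) (out : Int) : Prop := out = solution_alt scoville K
instance (scoville : List Int) (K : Int) (out : Int) : Decidable (Spec_solution scoville K out) := by
  unfold Spec_solution; infer_instance

-- ===== CLAIM (what is proved, stated in full; the proofs are below) =====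
def Claim_equal_solution : Prop := ∀ (scoville : List Int) (K : Int), Dom_solution scoville K → Pre_solution scoville K → Spec_solution scoville K (solution scoville K)

-- ===== LEMMAS AND PROOFS =====
-- length preservation of the heap operations and of the ordered insert
theorem pvSdGo_length : ∀ (fuel : Nat) (heap : List Int) (startpos pos : Nat) (newitem : Int),
    (pvSiftdownGo fuel heap startpos pos newitem).length = heap.length := by
  intro fuel
  induction fuel with
  | zero => intro heap s p x; simp [pvSiftdownGo]
  | succ f IH =>
    intro heap s p x
    simp only [pvSiftdownGo]
    split
    · split
      · rw [IH, List.length_set]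
      · rw [List.length_set]
    · rw [List.length_set]

theorem pvSiftdown_length (heap : List Int) (startpos pos : Nat) (newitem : Int) :
    (pvSiftdown heap startpos pos newitem).length = heap.length :=
  pvSdGo_length pos heap startpos pos newitem

theorem pvSulGo_length : ∀ (fuel : Nat) (heap : List Int) (pos : Nat),
    (pvSiftupLoopGo fuel heap pos).1.length = heap.length := by
  intro fuel
  induction fuel with
  | zero => intro heap p; rfl
  | succ f IH =>
    intro heap p
    simp only [pvSiftupLoopGo]
    split
    · rw [IH, List.length_set]
    · rfl

theorem pvSiftupLoop_length (heap : List Int) (pos : Nat) :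
    (pvSiftupLoop heap pos).1.length = heap.length :=
  pvSulGo_length heap.length heap pos

theorem pvSiftup_length (heap : List Int) (pos : Nat) :
    (pvSiftup heap pos).length = heap.length := by
  simp [pvSiftup, pvSiftdown_length, pvSiftupLoop_length]

theorem pvHeappop_length (heap : List Int) :
    (pvHeappop heap).2.length = heap.length - 1 := by
  rcases heap.eq_nil_or_concat with rfl | ⟨l', b, rfl⟩
  · simp [pvHeappop]
  · simp [pvHeappop, List.isEmpty_iff]
    split <;> simp_all [pvSiftup_length, List.length_set]

theorem pvHeappush_length (heap : List Int) (item : Int) :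
    (pvHeappush heap item).length = heap.length + 1 := by
  simp [pvHeappush, pvSiftdown_length]

theorem pvInsort_length (l : List Int) (x : Int) : (pvInsort l x).length = l.length + 1 := by
  induction l with
  | nil => rfl
  | cons y ys ih => simp [pvInsort]; split <;> simp [ih]

-- subtree membership: pvInSub s i ↔ i lies in the binary-heap subtree rooted at s
def pvInSub (s i : Nat) : Prop :=
  if _h : s < i then pvInSub s ((i-1)/2) else i = s
termination_by i
decreasing_by omega

theorem pvInSub_iff (s i : Nat) : pvInSub s i ↔ (i = s ∨ (s < i ∧ pvInSub s ((i-1)/2))) := by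
  rw [pvInSub]
  split
  · constructor
    · intro hp; right; exact ⟨by omega, hp⟩
    · rintro (rfl | ⟨_, hp⟩); · omega
      · exact hp
  · constructor
    · intro h; left; exact h
    · rintro (rfl | ⟨h1, _⟩); · rfl
      · omega

theorem pvInSub_self (s : Nat) : pvInSub s s := by rw [pvInSub_iff]; left; rfl

theorem pvInSub_ge {s i : Nat} (h : pvInSub s i) : s ≤ i := by
  rw [pvInSub_iff] at h; rcases h with rfl | ⟨h1, _⟩ <;> omega

theorem pvInSub_zero (i : Nat) : pvInSub 0 i := by
  induction i using Nat.strong_induction_on with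
  | _ i ih =>
    rw [pvInSub_iff]
    rcases Nat.eq_zero_or_pos i with rfl | hp
    · left; rfl
    · right; exact ⟨hp, ih _ (by omega)⟩

theorem pvInSub_parent {s i : Nat} (h : pvInSub s i) (hne : i ≠ s) : pvInSub s ((i-1)/2) := by
  rw [pvInSub_iff] at h; rcases h with rfl | ⟨_, h2⟩; · omega
  · exact h2

theorem pvInSub_child {s i j : Nat} (h : pvInSub s i) (hj : (j-1)/2 = i) (hji : i < j) : pvInSub s j := by
  rw [pvInSub_iff (i := j)]; right
  exact ⟨lt_of_le_of_lt (pvInSub_ge h) hji, by rw [hj]; exact h⟩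

theorem pvInSub_trans {s c j : Nat} (h1 : pvInSub s c) (h2 : pvInSub c j) : pvInSub s j := by
  induction j using Nat.strong_induction_on with
  | _ j ih =>
    rw [pvInSub_iff] at h2
    rcases h2 with rfl | ⟨hcj, h2⟩
    · exact h1
    · rw [pvInSub_iff]
      have hp := ih ((j-1)/2) (by omega) h2
      right; exact ⟨lt_of_le_of_lt (pvInSub_ge h1) hcj, hp⟩

theorem pvNotInSub_of_lt {s i : Nat} (h : i < s) : ¬ pvInSub s i :=
  fun hc => absurd (pvInSub_ge hc) (by omega)

-- basic getD/set facts
theorem pvGetD_set_eq (l : List Int) (i : Nat) (v : Int) (h : i < l.length) :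
    (l.set i v).getD i 0 = v := by
  simp [List.getD_eq_getElem?_getD, List.getElem?_set_self h]

theorem pvGetD_set_ne (l : List Int) (i j : Nat) (v : Int) (h : i ≠ j) :
    (l.set i v).getD j 0 = l.getD j 0 := by
  simp [List.getD_eq_getElem?_getD, List.getElem?_set_ne h]

theorem pvSet_getD_self (l : List Int) (i : Nat) (h : i < l.length) :
    l.set i (l.getD i 0) = l := by
  rw [List.getD_eq_getElem l 0 h]; exact List.set_getElem_self h

theorem pvMset_set (l : List Int) (i : Nat) (v : Int) (h : i < l.length) :
    (↑(l.set i v) : Multiset Int) + {l.getD i 0} = ↑l + {v} := by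
  induction l generalizing i with
  | nil => simp at h
  | cons a t ih =>
    cases i with
    | zero =>
      simp only [List.set_cons_zero, List.getD_cons_zero, ← Multiset.cons_coe,
        ← Multiset.singleton_add]
      abel
    | succ n =>
      have hrec := ih n (by simpa using h)
      simp only [List.set_cons_succ, List.getD_cons_succ, ← Multiset.cons_coe,
        ← Multiset.singleton_add] at hrec ⊢
      rw [add_assoc, add_assoc, hrec]

theorem pvGetD_mem (l : List Int) (i : Nat) (h : i < l.length) : l.getD i 0 ∈ l := by
  rw [List.getD_eq_getElem l 0 h]; exact List.getElem_mem h

-- correctness of the siftdown bubble-up: preserves positions outside the subtree of s,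
-- permutes h.set p x, and restores the heap pairs inside the subtree of s
theorem pvSdSet_spec (h : List Int) (p : Nat) (x : Int)
    (hps : p < h.length)
    (hA : ∀ j, 0 < j → j < h.length → pvInSub p ((j-1)/2) → j ≠ p →
      h.getD ((j-1)/2) 0 ≤ h.getD j 0)
    (hB : ∀ j, 0 < j → j < h.length → (j-1)/2 = p → x ≤ h.getD j 0) :
    (∀ j, ¬ pvInSub p j → (h.set p x).getD j 0 = h.getD j 0) ∧
    (∀ j, 0 < j → j < h.length → pvInSub p ((j-1)/2) →
      (h.set p x).getD ((j-1)/2) 0 ≤ (h.set p x).getD j 0) := by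
  constructor
  · intro j hjsub
    exact pvGetD_set_ne h p j x (fun e => hjsub (e ▸ pvInSub_self p))
  · intro j hj0 hjl hgsub
    by_cases hjp : j = p
    · subst hjp
      exfalso
      exact pvNotInSub_of_lt (by have := pvInSub_ge hgsub; omega) hgsub
    · rw [pvGetD_set_ne h p j x (fun e => hjp e.symm)]
      by_cases hgP : (j-1)/2 = p
      · rw [hgP, pvGetD_set_eq h p x hps]
        exact hB j hj0 hjl hgP
      · rw [pvGetD_set_ne h p _ x (fun e => hgP e.symm)]
        exact hA j hj0 hjl hgsub hjp

theorem pvSdGo_spec :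
    ∀ (fuel p : Nat) (h : List Int) (s : Nat) (x : Int), p ≤ fuel →
      pvInSub s p → p < h.length →
      (∀ j, 0 < j → j < h.length → pvInSub s ((j-1)/2) → j ≠ p →
        h.getD ((j-1)/2) 0 ≤ h.getD j 0) →
      (∀ j, 0 < j → j < h.length → (j-1)/2 = p → x ≤ h.getD j 0) →
      (s < p → ∀ j, 0 < j → j < h.length → (j-1)/2 = p →
        h.getD ((p-1)/2) 0 ≤ h.getD j 0) →
      (∀ j, ¬ pvInSub s j → (pvSiftdownGo fuel h s p x).getD j 0 = h.getD j 0) ∧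
      ((pvSiftdownGo fuel h s p x : Multiset Int) = (↑(h.set p x) : Multiset Int)) ∧
      (∀ j, 0 < j → j < h.length → pvInSub s ((j-1)/2) →
        (pvSiftdownGo fuel h s p x).getD ((j-1)/2) 0 ≤ (pvSiftdownGo fuel h s p x).getD j 0) := by
  intro fuel
  induction fuel with
  | zero =>
    intro p h s x hf hsp hp hA hB hC
    have hp0 : p = 0 := by omega
    subst hp0
    have hs0 : s = 0 := by have := pvInSub_ge hsp; omega
    subst hs0
    obtain ⟨c1, c2⟩ := pvSdSet_spec h 0 x hp hA hB
    exact ⟨c1, rfl, c2⟩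
  | succ f IH =>
    intro p h s x hf hsp hp hA hB hC
    simp only [pvSiftdownGo]
    by_cases hlt : s < p
    · rw [if_pos hlt]
      by_cases hx : x < h.getD ((p-1)/2) 0
      · rw [if_pos hx]
        -- recursive case
        set pp := (p-1)/2 with hpp
        set pv := h.getD pp 0 with hpv
        set h' := h.set p pv with hh'
        have hppp : pp < p := by omega
        have hlen' : h'.length = h.length := by simp [hh']
        have hgp : h'.getD p 0 = pv := pvGetD_set_eq h p pv hp
        have hgne : ∀ j, j ≠ p → h'.getD j 0 = h.getD j 0 := by
          intro j hj; exact pvGetD_set_ne h p j pv (by omega)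
        have hsub_pp : pvInSub s pp := pvInSub_parent hsp (by omega)
        have h0pp : s < pp → 0 < pp := by omega
        have IH' := IH pp h' s x (by omega) hsub_pp (by omega)
          (by -- hA'
            intro j hj0 hjl hgsub hjpp
            rw [hlen'] at hjl
            by_cases hjp : j = p
            · subst hjp
              have : (j-1)/2 = pp := rfl
              rw [this, hgp, hgne pp (by omega)]
            · rw [hgne j hjp]
              by_cases hgP : (j-1)/2 = p
              · rw [hgP, hgp]
                exact hC hlt j hj0 hjl hgP
              · rw [hgne _ hgP]
                exact hA j hj0 hjl hgsub hjp)
          (by -- hB'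
            intro j hj0 hjl hgpp
            rw [hlen'] at hjl
            by_cases hjp : j = p
            · subst hjp; rw [hgp]; exact le_of_lt hx
            · rw [hgne j hjp]
              calc x ≤ pv := le_of_lt hx
                _ = h.getD ((j-1)/2) 0 := by rw [hgpp]
                _ ≤ h.getD j 0 := hA j hj0 hjl (by rw [hgpp]; exact hsub_pp) hjp)
          (by -- hC'
            intro hspp j hj0 hjl hgpp
            rw [hlen'] at hjl
            have hpppP : (pp-1)/2 ≠ p := by omega
            rw [hgne _ hpppP]
            have hpair : h.getD ((pp-1)/2) 0 ≤ h.getD pp 0 := by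
              apply hA pp (h0pp hspp) (by omega)
                (pvInSub_parent hsub_pp (by omega)) (by omega)
            by_cases hjp : j = p
            · subst hjp; rw [hgp]; exact hpair
            · rw [hgne j hjp]
              have h2 := hA j hj0 hjl (by rw [hgpp]; exact hsub_pp) hjp
              rw [hgpp] at h2
              exact le_trans hpair h2)
        obtain ⟨IH1, IH2, IH3⟩ := IH'
        refine ⟨?_, ?_, ?_⟩
        · intro j hjsub
          rw [IH1 j hjsub, hgne j (fun e => hjsub (e ▸ hsp))]
        · rw [IH2]
          have e1 := pvMset_set h' pp x (by omega)
          have e2 := pvMset_set h p pv hp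
          have e3 := pvMset_set h p x hp
          rw [hgne pp (by omega), ← hpv] at e1
          have : (↑(h'.set pp x) : Multiset Int) + ({pv} + {h.getD p 0}) =
              (↑(h.set p x) : Multiset Int) + ({pv} + {h.getD p 0}) := by
            calc (↑(h'.set pp x) : Multiset Int) + ({pv} + {h.getD p 0})
                = (↑(h'.set pp x) + {pv}) + {h.getD p 0} := by rw [add_assoc]
              _ = (↑h' + {x}) + {h.getD p 0} := by rw [e1]
              _ = (↑h' + {h.getD p 0}) + {x} := by
                  rw [add_assoc, add_assoc, add_comm ({x} : Multiset Int)]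
              _ = (↑h + {pv}) + {x} := by rw [e2]
              _ = (↑h + {x}) + {pv} := by
                  rw [add_assoc, add_assoc, add_comm ({pv} : Multiset Int)]
              _ = (↑(h.set p x) + {h.getD p 0}) + {pv} := by rw [e3]
              _ = ↑(h.set p x) + ({pv} + {h.getD p 0}) := by
                  rw [add_assoc, add_comm ({h.getD p 0} : Multiset Int)]
          exact add_right_cancel this
        · intro j hj0 hjl hgsub
          exact IH3 j hj0 (by omega) hgsub
      · rw [if_neg hx]
        -- stop: parent ≤ x, place x at p
        have hple : h.getD ((p-1)/2) 0 ≤ x := le_of_not_gt hx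
        refine ⟨?_, rfl, ?_⟩
        · intro j hjsub
          exact pvGetD_set_ne h p j x (fun e => hjsub (e ▸ hsp))
        · intro j hj0 hjl hgsub
          by_cases hjp : j = p
          · subst hjp
            rw [pvGetD_set_eq h j x hjl,
              pvGetD_set_ne h j ((j-1)/2) x (by omega)]
            exact hple
          · rw [pvGetD_set_ne h p j x (fun e => hjp e.symm)]
            by_cases hgP : (j-1)/2 = p
            · rw [hgP, pvGetD_set_eq h p x hp]
              exact hB j hj0 hjl hgP
            · rw [pvGetD_set_ne h p _ x (fun e => hgP e.symm)]
              exact hA j hj0 hjl hgsub hjp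
    · rw [if_neg hlt]
      have hps : p = s := by have := pvInSub_ge hsp; omega
      subst hps
      obtain ⟨c1, c2⟩ := pvSdSet_spec h p x hp hA hB
      exact ⟨c1, rfl, c2⟩

theorem pvSd_spec (p : Nat) (h : List Int) (s : Nat) (x : Int)
    (hsp : pvInSub s p) (hp : p < h.length)
    (hA : ∀ j, 0 < j → j < h.length → pvInSub s ((j-1)/2) → j ≠ p →
      h.getD ((j-1)/2) 0 ≤ h.getD j 0)
    (hB : ∀ j, 0 < j → j < h.length → (j-1)/2 = p → x ≤ h.getD j 0)
    (hC : s < p → ∀ j, 0 < j → j < h.length → (j-1)/2 = p →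
      h.getD ((p-1)/2) 0 ≤ h.getD j 0) :
    (∀ j, ¬ pvInSub s j → (pvSiftdown h s p x).getD j 0 = h.getD j 0) ∧
    ((pvSiftdown h s p x : Multiset Int) = (↑(h.set p x) : Multiset Int)) ∧
    (∀ j, 0 < j → j < h.length → pvInSub s ((j-1)/2) →
      (pvSiftdown h s p x).getD ((j-1)/2) 0 ≤ (pvSiftdown h s p x).getD j 0) :=
  pvSdGo_spec p p h s x (le_refl p) hsp hp hA hB hC

-- root of a heap-ordered subtree is its minimum
theorem pvSubMin' (h : List Int) (c : Nat)
    (hA : ∀ j, 0 < j → j < h.length → pvInSub c ((j-1)/2) →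
      h.getD ((j-1)/2) 0 ≤ h.getD j 0) :
    ∀ j, pvInSub c j → j < h.length → h.getD c 0 ≤ h.getD j 0 := by
  intro j
  induction j using Nat.strong_induction_on with
  | _ j IHj =>
    intro hsub hjl
    by_cases hjc : j = c
    · subst hjc; exact le_refl _
    · have hcj : c < j := lt_of_le_of_ne (pvInSub_ge hsub) (Ne.symm hjc)
      have hg : pvInSub c ((j-1)/2) := pvInSub_parent hsub hjc
      calc h.getD c 0 ≤ h.getD ((j-1)/2) 0 := IHj _ (by omega) hg (by omega)
        _ ≤ h.getD j 0 := hA j (by omega) hjl hg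

def pvChild (h : List Int) (q : Nat) : Nat :=
  if 2*q+1+1 < h.length ∧ ¬ (h.getD (2*q+1) 0 < h.getD (2*q+1+1) 0) then 2*q+1+1 else 2*q+1

theorem pvSulGo_eq_step (n : Nat) (h : List Int) (q : Nat) (hlt : 2*q+1 < h.length) :
    pvSiftupLoopGo (n+1) h q = pvSiftupLoopGo n (h.set q (h.getD (pvChild h q) 0)) (pvChild h q) := by
  simp only [pvSiftupLoopGo, if_pos hlt]; rfl

theorem pvSulGo_eq_base (n : Nat) (h : List Int) (q : Nat) (hlt : ¬ 2*q+1 < h.length) :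
    pvSiftupLoopGo (n+1) h q = (h, q) := by
  simp only [pvSiftupLoopGo, if_neg hlt]

theorem pvChild_spec (h : List Int) (q : Nat) (hlt : 2*q+1 < h.length) :
    (q < pvChild h q ∧ pvChild h q < h.length ∧ (pvChild h q - 1)/2 = q) ∧
    (∀ o, (o-1)/2 = q → 0 < o → o < h.length → h.getD (pvChild h q) 0 ≤ h.getD o 0) := by
  unfold pvChild
  split
  · next hc =>
    obtain ⟨hc1, hc2⟩ := hc
    refine ⟨⟨by omega, by omega, by omega⟩, ?_⟩
    intro o ho hopos holen
    have : o = 2*q+1 ∨ o = 2*q+1+1 := by omega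
    rcases this with rfl | rfl
    · exact le_of_not_gt hc2
    · exact le_refl _
  · next hc =>
    refine ⟨⟨by omega, by omega, by omega⟩, ?_⟩
    intro o ho hopos holen
    have : o = 2*q+1 ∨ o = 2*q+1+1 := by omega
    rcases this with rfl | rfl
    · exact le_refl _
    · rcases not_and_or.mp hc with hc' | hc'
      · omega
      · exact le_of_lt (not_not.mp hc')

-- the siftup descent loop: stays inside the subtree of q, permutes (up to the final write),
-- keeps all heap pairs of the subtree except at the hole, and every value is an original one
theorem pvSulGo_spec :
    ∀ (n : Nat) (h : List Int) (q : Nat), h.length - q ≤ n → q < h.length →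
      (∀ j, 0 < j → j < h.length → pvInSub q ((j-1)/2) → (j-1)/2 ≠ q →
        h.getD ((j-1)/2) 0 ≤ h.getD j 0) →
      (pvSiftupLoopGo n h q).1.length = h.length ∧
      pvInSub q (pvSiftupLoopGo n h q).2 ∧
      (pvSiftupLoopGo n h q).2 < h.length ∧
      h.length ≤ 2*(pvSiftupLoopGo n h q).2+1 ∧
      (∀ j, ¬ pvInSub q j → (pvSiftupLoopGo n h q).1.getD j 0 = h.getD j 0) ∧
      (∀ v : Int, (↑((pvSiftupLoopGo n h q).1.set (pvSiftupLoopGo n h q).2 v) : Multiset Int) = ↑(h.set q v)) ∧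
      (∀ j, 0 < j → j < h.length → pvInSub q ((j-1)/2) → j ≠ (pvSiftupLoopGo n h q).2 →
        (pvSiftupLoopGo n h q).1.getD ((j-1)/2) 0 ≤ (pvSiftupLoopGo n h q).1.getD j 0) ∧
      (∀ j, pvInSub q j → j < h.length → j ≠ (pvSiftupLoopGo n h q).2 →
        ∃ j', pvInSub j j' ∧ j' < h.length ∧ (pvSiftupLoopGo n h q).1.getD j 0 = h.getD j' 0) := by
  intro n
  induction n with
  | zero => intro h q hn hq _; omega
  | succ n IH =>
    intro h q hn hq hA
    by_cases hlt : 2*q+1 < h.length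
    · obtain ⟨⟨hcq, hcl, hcg⟩, hmin⟩ := pvChild_spec h q hlt
      set c := pvChild h q with hc
      rw [pvSulGo_eq_step n h q hlt]
      set h' := h.set q (h.getD c 0) with hh'
      have hlen' : h'.length = h.length := by simp [hh']
      have hqc : pvInSub q c := pvInSub_child (pvInSub_self q) hcg hcq
      have hnc : ¬ pvInSub c q := pvNotInSub_of_lt hcq
      have hsubne : ∀ {j}, pvInSub c j → j ≠ q := fun hj => by
        have := pvInSub_ge hj; omega
      have hgne : ∀ j, j ≠ q → h'.getD j 0 = h.getD j 0 := fun j hj =>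
        pvGetD_set_ne h q j _ (fun e => hj e.symm)
      have hgq : h'.getD q 0 = h.getD c 0 := pvGetD_set_eq h q _ hq
      -- heap pairs inside subtree of c (incl. its root pairs), in h
      have hAc : ∀ j, 0 < j → j < h.length → pvInSub c ((j-1)/2) →
          h.getD ((j-1)/2) 0 ≤ h.getD j 0 := by
        intro j hj0 hjl hgsub
        have hq_g : pvInSub q ((j-1)/2) := pvInSub_trans hqc hgsub
        exact hA j hj0 hjl hq_g (by have := pvInSub_ge hgsub; omega)
      have hA' : ∀ j, 0 < j → j < h'.length → pvInSub c ((j-1)/2) → (j-1)/2 ≠ c →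
          h'.getD ((j-1)/2) 0 ≤ h'.getD j 0 := by
        intro j hj0 hjl hgsub hgc
        rw [hlen'] at hjl
        have hgq' : (j-1)/2 ≠ q := hsubne hgsub
        have hjq : j ≠ q := by have := pvInSub_ge hgsub; omega
        rw [hgne _ hgq', hgne _ hjq]
        exact hAc j hj0 hjl hgsub
      have IH' := IH h' c (by omega) (by omega) hA'
      obtain ⟨I1, I2, I3, I4, I5, I6, I7, I8⟩ := IH'
      rw [hlen'] at I1 I3 I4
      have hp'q : pvInSub q (pvSiftupLoopGo n h' c).2 := pvInSub_trans hqc I2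
      have hnsub_of : ∀ {j}, ¬ pvInSub q j → ¬ pvInSub c j := fun hj hcj =>
        hj (pvInSub_trans hqc hcj)
      refine ⟨I1, hp'q, I3, I4, ?_, ?_, ?_, ?_⟩
      · -- outside subtree of q unchanged
        intro j hj
        rw [I5 j (hnsub_of hj), hgne j (fun e => hj (e ▸ pvInSub_self q))]
      · -- multiset
        intro v
        rw [I6 v]
        have e1 := pvMset_set h' c v (by omega)
        have e2 := pvMset_set h q (h.getD c 0) hq
        have e3 := pvMset_set h q v hq
        rw [hgne c (by omega)] at e1
        have key : (↑(h'.set c v) : Multiset Int) + ({h.getD c 0} + {h.getD q 0}) =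
            (↑(h.set q v) : Multiset Int) + ({h.getD c 0} + {h.getD q 0}) := by
          calc (↑(h'.set c v) : Multiset Int) + ({h.getD c 0} + {h.getD q 0})
              = (↑(h'.set c v) + {h.getD c 0}) + {h.getD q 0} := by rw [add_assoc]
            _ = (↑h' + {v}) + {h.getD q 0} := by rw [e1]
            _ = (↑h' + {h.getD q 0}) + {v} := by
                rw [add_assoc, add_assoc, add_comm ({v} : Multiset Int)]
            _ = (↑h + {h.getD c 0}) + {v} := by rw [e2]
            _ = (↑h + {v}) + {h.getD c 0} := by
                rw [add_assoc, add_assoc, add_comm ({h.getD c 0} : Multiset Int)]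
            _ = (↑(h.set q v) + {h.getD q 0}) + {h.getD c 0} := by rw [e3]
            _ = ↑(h.set q v) + ({h.getD c 0} + {h.getD q 0}) := by
                rw [add_assoc, add_comm ({h.getD q 0} : Multiset Int)]
        exact add_right_cancel key
      · -- heap pairs except at the hole
        intro j hj0 hjl hgsub hjp
        by_cases hgc2 : pvInSub c ((j-1)/2)
        · exact I7 j hj0 (by omega) hgc2 hjp
        · by_cases hgq2 : (j-1)/2 = q
          · -- children of q
            have hrq : (pvSiftupLoopGo n h' c).1.getD q 0 = h.getD c 0 := by
              rw [I5 q hnc, hgq]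
            by_cases hjc : j = c
            · subst hjc
              obtain ⟨j', hj'1, hj'2, hj'3⟩ := I8 c (pvInSub_self c) (by omega) hjp
              rw [hgq2, hrq, hj'3, hgne j' (hsubne hj'1)]
              exact pvSubMin' h c hAc j' hj'1 (by omega)
            · have hnjc : ¬ pvInSub c j := by
                intro hcj
                rcases (pvInSub_iff c j).mp hcj with rfl | ⟨_, hx⟩
                · exact hjc rfl
                · exact hgc2 hx
              rw [hgq2, hrq, I5 j hnjc, hgne j (by omega)]
              exact hmin j hgq2 hj0 hjl
          · -- pair untouched
            have hgq_ne : (j-1)/2 ≠ q := hgq2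
            have hjqn : j ≠ q := by have := pvInSub_ge hgsub; omega
            have hnjc : ¬ pvInSub c j := by
              intro hcj
              rcases (pvInSub_iff c j).mp hcj with rfl | ⟨_, hx⟩
              · exact hgq2 hcg
              · exact hgc2 hx
            rw [I5 j hnjc, hgne j hjqn, I5 _ hgc2, hgne _ hgq_ne]
            exact hA j hj0 hjl hgsub hgq_ne
      · -- every value is an original value of a descendant
        intro j hjsub hjlen hjp
        by_cases hjq : j = q
        · subst hjq
          refine ⟨c, hqc, hcl, ?_⟩
          rw [I5 j hnc, hgq]
        · by_cases hjc2 : pvInSub c j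
          · obtain ⟨j', hj'1, hj'2, hj'3⟩ := I8 j hjc2 (by omega) hjp
            refine ⟨j', hj'1, by omega, ?_⟩
            rw [hj'3]
            exact hgne j' (by
              have h1 := pvInSub_ge hj'1
              have h2 := pvInSub_ge hjc2
              omega)
          · refine ⟨j, pvInSub_self j, hjlen, ?_⟩
            rw [I5 j hjc2, hgne j hjq]
    · rw [pvSulGo_eq_base n h q hlt]
      refine ⟨rfl, pvInSub_self q, hq, by omega, fun j _ => rfl, fun v => rfl, ?_, ?_⟩
      · intro j hj0 hjl hgsub hjq
        by_cases hgq : (j-1)/2 = q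
        · omega
        · exact hA j hj0 hjl hgsub hgq
      · intro j hjsub hjlen hjq
        exact ⟨j, pvInSub_self j, hjlen, rfl⟩

theorem pvSul_spec (h : List Int) (q : Nat) (hq : q < h.length)
    (hA : ∀ j, 0 < j → j < h.length → pvInSub q ((j-1)/2) → (j-1)/2 ≠ q →
      h.getD ((j-1)/2) 0 ≤ h.getD j 0) :
    (pvSiftupLoop h q).1.length = h.length ∧
    pvInSub q (pvSiftupLoop h q).2 ∧
    (pvSiftupLoop h q).2 < h.length ∧
    h.length ≤ 2*(pvSiftupLoop h q).2+1 ∧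
    (∀ j, ¬ pvInSub q j → (pvSiftupLoop h q).1.getD j 0 = h.getD j 0) ∧
    (∀ v : Int, (↑((pvSiftupLoop h q).1.set (pvSiftupLoop h q).2 v) : Multiset Int) = ↑(h.set q v)) ∧
    (∀ j, 0 < j → j < h.length → pvInSub q ((j-1)/2) → j ≠ (pvSiftupLoop h q).2 →
      (pvSiftupLoop h q).1.getD ((j-1)/2) 0 ≤ (pvSiftupLoop h q).1.getD j 0) ∧
    (∀ j, pvInSub q j → j < h.length → j ≠ (pvSiftupLoop h q).2 →
      ∃ j', pvInSub j j' ∧ j' < h.length ∧ (pvSiftupLoop h q).1.getD j 0 = h.getD j' 0) :=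
  pvSulGo_spec h.length h q (by omega) hq hA

-- heap pairs with parent index at least k
def pvInv (k : Nat) (h : List Int) : Prop :=
  ∀ j, 0 < j → j < h.length → k ≤ (j-1)/2 → h.getD ((j-1)/2) 0 ≤ h.getD j 0

theorem pvSu_spec (h : List Int) (i : Nat) (hi : i < h.length)
    (hA : ∀ j, 0 < j → j < h.length → pvInSub i ((j-1)/2) → (j-1)/2 ≠ i →
      h.getD ((j-1)/2) 0 ≤ h.getD j 0) :
    (pvSiftup h i).length = h.length ∧
    (∀ j, ¬ pvInSub i j → (pvSiftup h i).getD j 0 = h.getD j 0) ∧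
    ((pvSiftup h i : Multiset Int) = (↑h : Multiset Int)) ∧
    (∀ j, 0 < j → j < h.length → pvInSub i ((j-1)/2) →
      (pvSiftup h i).getD ((j-1)/2) 0 ≤ (pvSiftup h i).getD j 0) := by
  obtain ⟨I1, I2, I3, I4, I5, I6, I7, I8⟩ := pvSul_spec h i hi hA
  have hsd := pvSd_spec (pvSiftupLoop h i).2 (pvSiftupLoop h i).1 i (h.getD i 0)
    I2 (by omega)
    (by intro j hj0 hjl hgsub hjp; exact I7 j hj0 (by omega) hgsub hjp)
    (by intro j hj0 hjl hgP; omega)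
    (by intro _ j hj0 hjl hgP; omega)
  obtain ⟨S1, S2, S3⟩ := hsd
  have hr : pvSiftup h i = pvSiftdown (pvSiftupLoop h i).1 i (pvSiftupLoop h i).2 (h.getD i 0) := rfl
  refine ⟨?_, ?_, ?_, ?_⟩
  · rw [hr, pvSiftdown_length, I1]
  · intro j hj; rw [hr, S1 j hj, I5 j hj]
  · rw [hr, S2, I6 (h.getD i 0), pvSet_getD_self h i hi]
  · intro j hj0 hjl hgsub
    rw [hr]; exact S3 j hj0 (by omega) hgsub

theorem pvSu_inv (h : List Int) (k : Nat) (hk : k < h.length) (hInv : pvInv (k+1) h) :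
    pvInv k (pvSiftup h k) ∧ ((pvSiftup h k : Multiset Int) = (↑h : Multiset Int)) ∧
    (pvSiftup h k).length = h.length := by
  obtain ⟨S1, S2, S3, S4⟩ := pvSu_spec h k hk
    (by intro j hj0 hjl hgsub hgk
        exact hInv j hj0 hjl (by have := pvInSub_ge hgsub; omega))
  refine ⟨?_, S3, S1⟩
  intro j hj0 hjl hkg
  rw [S1] at hjl
  by_cases hsub : pvInSub k ((j-1)/2)
  · exact S4 j hj0 hjl hsub
  · have hgk : (j-1)/2 ≠ k := fun e => hsub (e ▸ pvInSub_self k)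
    have hjn : ¬ pvInSub k j := by
      intro hc
      rcases (pvInSub_iff k j).mp hc with rfl | ⟨_, hx⟩
      · omega
      · exact hsub hx
    rw [S2 j hjn, S2 _ hsub]
    exact hInv j hj0 hjl (by omega)

theorem pvFold_spec : ∀ (k : Nat) (h : List Int), 2*k ≤ h.length → pvInv k h →
    pvInv 0 ((List.range k).reverse.foldl (fun a i => pvSiftup a i) h) ∧
    ((↑((List.range k).reverse.foldl (fun a i => pvSiftup a i) h) : Multiset Int) = ↑h) ∧
    ((List.range k).reverse.foldl (fun a i => pvSiftup a i) h).length = h.length := by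
  intro k
  induction k with
  | zero => intro h _ hInv; exact ⟨hInv, rfl, rfl⟩
  | succ k IH =>
    intro h hk hInv
    have hstep : (List.range (k+1)).reverse = k :: (List.range k).reverse := by
      rw [List.range_succ, List.reverse_append]; rfl
    rw [hstep, List.foldl_cons]
    have h1 := pvSu_inv h k (by omega) (by intro j a b c; exact hInv j a b (by omega))
    obtain ⟨hI, hM, hL⟩ := h1
    have h2 := IH (pvSiftup h k) (by omega) hI
    obtain ⟨g1, g2, g3⟩ := h2
    exact ⟨g1, by rw [g2, hM], by rw [g3, hL]⟩

theorem pvHeapify_spec (l : List Int) :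
    pvInv 0 (pvHeapify l) ∧ ((pvHeapify l : Multiset Int) = (↑l : Multiset Int)) ∧
    (pvHeapify l).length = l.length := by
  apply pvFold_spec (l.length / 2) l (by omega)
  intro j hj0 hjl hge; omega

theorem pvRootMin (h : List Int) (hInv : pvInv 0 h) :
    ∀ x ∈ h, h.getD 0 0 ≤ x := by
  intro x hx
  obtain ⟨i, hi, rfl⟩ := List.mem_iff_getElem.mp hx
  rw [← List.getD_eq_getElem h 0 hi]
  exact pvSubMin' h 0 (fun j a b _ => hInv j a b (by omega)) i (pvInSub_zero i) hi

theorem pvHeappop_spec (h : List Int) (hInv : pvInv 0 h) (hne : h ≠ []) :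
    (pvHeappop h).1 = h.getD 0 0 ∧ pvInv 0 (pvHeappop h).2 ∧
    ((↑h : Multiset Int) = h.getD 0 0 ::ₘ ↑(pvHeappop h).2) := by
  rcases h.eq_nil_or_concat with rfl | ⟨l', b, rfl⟩
  · exact absurd rfl hne
  · simp only [List.concat_eq_append] at hInv hne ⊢
    have hpop : pvHeappop (l' ++ [b]) =
        (if l'.isEmpty then (b, l')
         else (l'.getD 0 0, pvSiftup (l'.set 0 b) 0)) := by
      simp [pvHeappop]
    by_cases hl' : l' = []
    · subst hl'
      simp only [List.isEmpty_nil, if_pos] at hpop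
      rw [hpop]
      refine ⟨rfl, by intro j hj0 hjl _; simp at hjl, ?_⟩
      simp
    · rw [hpop, if_neg (by simpa [List.isEmpty_iff] using hl')]
      have hl'len : 0 < l'.length := List.length_pos_iff.mpr hl'
      have hget : ∀ j, j < l'.length → (l'.set 0 b).getD j 0 = (l' ++ [b]).getD j 0 ∨ j = 0 := by
        intro j hj
        by_cases hj0 : j = 0
        · right; exact hj0
        · left
          rw [pvGetD_set_ne l' 0 j b (fun e => hj0 e.symm), List.getD_append _ _ _ _ hj]
      obtain ⟨S1, S2, S3, S4⟩ := pvSu_spec (l'.set 0 b) 0 (by simpa using hl'len)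
        (by
          intro j hj0 hjl hgsub hgne0
          simp only [List.length_set] at hjl
          have e1 : (l'.set 0 b).getD ((j-1)/2) 0 = l'.getD ((j-1)/2) 0 :=
            pvGetD_set_ne l' 0 _ b (fun e => hgne0 e.symm)
          have e2 : (l'.set 0 b).getD j 0 = l'.getD j 0 :=
            pvGetD_set_ne l' 0 j b (by omega)
          rw [e1, e2, ← List.getD_append l' [b] 0 _ (by omega),
            ← List.getD_append l' [b] 0 j hjl]
          exact hInv j hj0 (by simp; omega) (by omega))
      refine ⟨by rw [List.getD_append _ _ _ _ hl'len], ?_, ?_⟩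
      · intro j hj0 hjl hge
        rw [S1, List.length_set] at hjl
        exact S4 j hj0 (by simpa using hjl) (pvInSub_zero _)
      · have e1 := pvMset_set l' 0 b hl'len
        have e2 : ((l' ++ [b] : List Int) : Multiset Int) = ↑l' + {b} := rfl
        rw [S3, e2, ← e1, Multiset.add_comm, Multiset.singleton_add,
          List.getD_append _ _ _ _ hl'len]
  -- done
theorem pvHeappush_spec (h : List Int) (x : Int) (hInv : pvInv 0 h) :
    pvInv 0 (pvHeappush h x) ∧ ((pvHeappush h x : Multiset Int) = x ::ₘ (↑h : Multiset Int)) := by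
  have hgetx : (h ++ [x]).getD h.length 0 = x := by
    rw [List.getD_eq_getElem _ _ (by simp), List.getElem_concat_length rfl]
  obtain ⟨S1, S2, S3⟩ := pvSd_spec h.length (h ++ [x]) 0 x (pvInSub_zero _) (by simp)
    (by
      intro j hj0 hjl hgsub hjp
      simp only [List.length_append, List.length_cons, List.length_nil] at hjl
      rw [List.getD_append h [x] 0 _ (by omega), List.getD_append h [x] 0 j (by omega)]
      exact hInv j hj0 (by omega) (by omega))
    (by intro j hj0 hjl hgP; simp at hjl; omega)
    (by intro h0 j hj0 hjl hgP; simp at hjl; omega)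
  have hr : pvHeappush h x = pvSiftdown (h ++ [x]) 0 h.length x := rfl
  constructor
  · intro j hj0 hjl hge
    rw [hr, pvSiftdown_length] at hjl
    rw [hr]
    exact S3 j hj0 (by simpa using hjl) (pvInSub_zero _)
  · rw [hr, S2]
    have hset : (h ++ [x]).set h.length x = h ++ [x] := by simp
    rw [hset]
    simp

-- sorted-list side
theorem pvInsort_mset (l : List Int) (x : Int) :
    ((pvInsort l x : List Int) : Multiset Int) = x ::ₘ ↑l := by
  induction l with
  | nil => rfl
  | cons y ys ih =>
    rw [pvInsort]
    split
    · rfl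
    · rw [← Multiset.cons_coe, ih, ← Multiset.cons_coe, Multiset.cons_swap]

theorem pvInsort_mem (l : List Int) (x z : Int) (hz : z ∈ pvInsort l x) : z = x ∨ z ∈ l := by
  have : z ∈ (↑(pvInsort l x) : Multiset Int) := by rwa [Multiset.mem_coe]
  rw [pvInsort_mset, Multiset.mem_cons, Multiset.mem_coe] at this
  exact this

theorem pvInsort_sorted (l : List Int) (x : Int) (hs : l.Pairwise (· ≤ ·)) :
    (pvInsort l x).Pairwise (· ≤ ·) := by
  induction l with
  | nil => simp [pvInsort]
  | cons y ys ih =>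
    obtain ⟨hy, hys⟩ := List.pairwise_cons.mp hs
    rw [pvInsort]
    split
    · next hlt =>
      refine List.pairwise_cons.mpr ⟨?_, hs⟩
      intro z hz
      rcases List.mem_cons.mp hz with rfl | hz'
      · exact le_of_lt hlt
      · exact le_trans (le_of_lt hlt) (hy z hz')
    · next hge =>
      refine List.pairwise_cons.mpr ⟨?_, ih hys⟩
      intro z hz
      rcases pvInsort_mem ys x z hz with rfl | hz'
      · exact le_of_not_gt (by simpa using hge)
      · exact hy z hz'

theorem pvSortedHead (a : Int) (t : List Int) (hs : (a :: t).Pairwise (· ≤ ·)) :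
    ∀ y ∈ a :: t, a ≤ y := by
  intro y hy
  rcases List.mem_cons.mp hy with rfl | hy'
  · exact le_refl y
  · exact (List.pairwise_cons.mp hs).1 y hy'

-- step/stop equations for the two loops
theorem pvLoopA_stop (f : Nat) (h : List Int) (K cnt : Int) (hK : ¬ h.getD 0 0 < K) :
    pvLoopAGo (f+1) h K cnt = cnt := by
  simp only [pvLoopAGo, if_neg hK]

theorem pvLoopA_neg1 (f : Nat) (h : List Int) (K cnt : Int) (hK : h.getD 0 0 < K)
    (hlen : h.length ≤ 1) : pvLoopAGo (f+1) h K cnt = -1 := by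
  simp only [pvLoopAGo, if_pos hK, if_pos hlen]

theorem pvLoopA_step (f : Nat) (h : List Int) (K cnt : Int) (hK : h.getD 0 0 < K)
    (hlen : ¬ h.length ≤ 1) :
    pvLoopAGo (f+1) h K cnt = pvLoopAGo f (pvHeappush (pvHeappop (pvHeappop h).2).2
      ((pvHeappop h).1 + (pvHeappop (pvHeappop h).2).1 * 2)) K (cnt + 1) := by
  simp only [pvLoopAGo, if_pos hK, if_neg hlen]

theorem pvLoopB_stop (f : Nat) (s : List Int) (K cnt : Int) (hK : ¬ s.getD 0 0 < K) :
    pvLoopBGo (f+1) s K cnt = cnt := by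
  simp only [pvLoopBGo, if_neg hK]

theorem pvLoopB_neg1 (f : Nat) (s : List Int) (K cnt : Int) (hK : s.getD 0 0 < K)
    (hlen : s.length ≤ 1) : pvLoopBGo (f+1) s K cnt = -1 := by
  simp only [pvLoopBGo, if_pos hK, if_pos hlen]

theorem pvLoopB_step (f : Nat) (s : List Int) (K cnt : Int) (hK : s.getD 0 0 < K)
    (hlen : ¬ s.length ≤ 1) :
    pvLoopBGo (f+1) s K cnt = pvLoopBGo f (pvInsort (s.drop 2) (s.getD 0 0 + 2 * s.getD 1 0)) K (cnt + 1) := by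
  simp only [pvLoopBGo, if_pos hK, if_neg hlen]

-- main loop equivalence: lazy heap vs maintained sorted list over the same multiset
theorem pvLoop_eq : ∀ (fa fb : Nat) (h s : List Int) (K cnt : Int),
    h.length < fa → s.length < fb → pvInv 0 h → s.Pairwise (· ≤ ·) → ((↑s : Multiset Int) = ↑h) →
    h ≠ [] → pvLoopAGo fa h K cnt = pvLoopBGo fb s K cnt := by
  intro fa
  induction fa with
  | zero =>
    intro fb h s K cnt hfa _ _ _ _ _
    omega
  | succ n IH =>
    intro fb h s K cnt hfa hfb hInv hsort hm hne
    obtain ⟨g, rfl⟩ : ∃ g, fb = g + 1 := ⟨fb - 1, by omega⟩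
    have hperm : s.Perm h := Multiset.coe_eq_coe.mp hm
    have hslen : s.length = h.length := hperm.length_eq
    have hhlen : 0 < h.length := List.length_pos_iff.mpr hne
    obtain ⟨a, t, rfl⟩ : ∃ a t, s = a :: t := by
      cases s with
      | nil => simp at hslen; omega
      | cons a t => exact ⟨a, t, rfl⟩
    have hroot_mem : h.getD 0 0 ∈ a :: t := hperm.mem_iff.mpr (pvGetD_mem h 0 hhlen)
    have ha : a = h.getD 0 0 :=
      le_antisymm (pvSortedHead a t hsort _ hroot_mem)
        (pvRootMin h hInv a (hperm.subset List.mem_cons_self))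
    have hsget : (a :: t).getD 0 0 = a := rfl
    by_cases hK : h.getD 0 0 < K
    · by_cases hlen : h.length ≤ 1
      · rw [pvLoopA_neg1 n h K cnt hK hlen,
          pvLoopB_neg1 g _ K cnt (by rw [hsget, ha]; exact hK) (by omega)]
      · obtain ⟨b, u, rfl⟩ : ∃ b u, t = b :: u := by
          cases t with
          | nil => simp at hslen; omega
          | cons b u => exact ⟨b, u, rfl⟩
        obtain ⟨P1a, hInv1, hm1⟩ := pvHeappop_spec h hInv hne
        set h1 := (pvHeappop h).2 with hh1
        have hlen1 : h1.length = h.length - 1 := pvHeappop_length h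
        have hne1 : h1 ≠ [] := List.length_pos_iff.mp (by omega)
        have hmt : ((b :: u : List Int) : Multiset Int) = ↑h1 := by
          have h0 : (a ::ₘ ↑(b :: u) : Multiset Int) = a ::ₘ ↑h1 := by
            rw [Multiset.cons_coe, hm, hm1, ha]
          exact (Multiset.cons_inj_right _).mp h0
        have hpermt : (b :: u).Perm h1 := Multiset.coe_eq_coe.mp hmt
        have hsortt : (b :: u).Pairwise (· ≤ ·) := hsort.of_cons
        obtain ⟨P2a, hInv2, hm2⟩ := pvHeappop_spec h1 hInv1 hne1
        set h2 := (pvHeappop h1).2 with hh2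
        have hb : b = h1.getD 0 0 :=
          le_antisymm
            (pvSortedHead b u hsortt _ (hpermt.mem_iff.mpr (pvGetD_mem h1 0 (by omega))))
            (pvRootMin h1 hInv1 b (hpermt.subset List.mem_cons_self))
        have hmu : ((u : List Int) : Multiset Int) = ↑h2 := by
          have h0 : (b ::ₘ ↑u : Multiset Int) = b ::ₘ ↑h2 := by
            rw [Multiset.cons_coe, hmt, hm2, hb]
          exact (Multiset.cons_inj_right _).mp h0
        obtain ⟨hInv3, hm3⟩ := pvHeappush_spec h2 ((pvHeappop h).1 + (pvHeappop h1).1 * 2) hInv2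
        set h3 := pvHeappush h2 ((pvHeappop h).1 + (pvHeappop h1).1 * 2) with hh3
        have hlen2 : h2.length = h1.length - 1 := pvHeappop_length h1
        have hlen3 : h3.length = h.length - 1 := by
          have e1 := pvHeappush_length h2 ((pvHeappop h).1 + (pvHeappop h1).1 * 2)
          rw [← hh3] at e1
          omega
        have hne3 : h3 ≠ [] := List.length_pos_iff.mp (by rw [hlen3]; omega)
        have hval : (pvHeappop h).1 + (pvHeappop h1).1 * 2 =
            (a :: b :: u).getD 0 0 + 2 * (a :: b :: u).getD 1 0 := by
          rw [P1a, P2a, ← ha, ← hb]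
          ring_nf
          rfl
        have hs' : ((pvInsort u ((a :: b :: u).getD 0 0 + 2 * (a :: b :: u).getD 1 0) : List Int) :
            Multiset Int) = ↑h3 := by
          rw [pvInsort_mset, hmu, hh3, hm3, hval]
        rw [pvLoopA_step n h K cnt hK hlen,
          pvLoopB_step g _ K cnt (by rw [hsget, ha]; exact hK) (by omega)]
        have hs'len : (pvInsort u ((a :: b :: u).getD 0 0 + 2 * (a :: b :: u).getD 1 0)).length
            = u.length + 1 := pvInsort_length _ _
        apply IH g h3 _ K (cnt + 1) (by rw [hlen3]; omega) ?_ hInv3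
          (pvInsort_sorted u _ hsortt.of_cons) hs' hne3
        rw [hs'len]
        simp only [List.length_cons] at hslen hfb
        omega
    · rw [pvLoopA_stop n h K cnt hK, pvLoopB_stop g _ K cnt (by rw [hsget, ha]; exact hK)]

-- ===== VERDICT (by name: the statement is the Claim_ definition above) =====
theorem solution_spec : Claim_equal_solution := by
  intro scoville K _hdom hpre
  unfold Spec_solution
  obtain ⟨hI, hM, hL⟩ := pvHeapify_spec scoville
  have hs_pair : (PySem.List.sorted scoville (fun x => x) false).Pairwise (· ≤ ·) := by
    simpa using PySem.List.sorted_pairwise scoville (fun x => x)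
  have hs_m : ((PySem.List.sorted scoville (fun x => x) false : List Int) : Multiset Int) =
      ↑(pvHeapify scoville) := by
    rw [hM]
    exact Multiset.coe_eq_coe.mpr (PySem.List.sorted_perm scoville (fun x => x) false)
  have hne : pvHeapify scoville ≠ [] := by
    intro e
    apply hpre
    apply List.length_eq_zero_iff.mp
    rw [← hL, e]
    rfl
  have hslen : (PySem.List.sorted scoville (fun x => x) false).length = scoville.length :=
    (PySem.List.sorted_perm scoville (fun x => x) false).length_eq
  exact pvLoop_eq (scoville.length + 1) (scoville.length + 1) (pvHeapify scoville)
    (PySem.List.sorted scoville (fun x => x) false) K 0 (by rw [hL]; omega)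
    (by rw [hslen]; omega) hI hs_pair hs_m hne
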